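-- pv_equiv track=rewrite | github.com/CatiaBio/PlantEuka | scripts/rotate_clean_genomes.py | clean_sequence
-- ===== SOURCE A (Python) =====
-- from collections import Counter
--
-- def clean_sequence(sequence):
--     """Clean sequence by replacing non-nucleotide characters with 'N'."""
--     replaced_details = []
--     cleaned_sequence = []
--     for index, nucleotide in enumerate(sequence.upper()):
--         if nucleotide not in 'ACGTN':
--             cleaned_sequence.append('N')
--             replaced_details.append(nucleotide)
--         else:
--             cleaned_sequence.append(nucleotide)
--     return ''.join(cleaned_sequence), Counter(replaced_details)
-- ===== SOURCE B (Python) =====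
-- from collections import Counter
--
-- def clean_sequence(sequence):
--     """Clean sequence by replacing non-nucleotide characters with 'N'."""
--     upper = sequence.upper()
--     counts = Counter(upper)
--     for b in 'ACGTN':
--         counts.pop(b, None)
--     cleaned = ''.join('N' if c not in 'ACGTN' else c for c in upper)
--     return cleaned, counts
-- ===== Notes on version B (the rewrite author's own statement) =====
-- stated objective: alternative
-- what changed: Instead of one pass that accumulates a replaced-only list and counts it afterwards, B counts ALL characters of the uppercased string with one Counter and then prunes the five valid bases from the table, building the cleaned string in a separate map pass.
import Mathlib
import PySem

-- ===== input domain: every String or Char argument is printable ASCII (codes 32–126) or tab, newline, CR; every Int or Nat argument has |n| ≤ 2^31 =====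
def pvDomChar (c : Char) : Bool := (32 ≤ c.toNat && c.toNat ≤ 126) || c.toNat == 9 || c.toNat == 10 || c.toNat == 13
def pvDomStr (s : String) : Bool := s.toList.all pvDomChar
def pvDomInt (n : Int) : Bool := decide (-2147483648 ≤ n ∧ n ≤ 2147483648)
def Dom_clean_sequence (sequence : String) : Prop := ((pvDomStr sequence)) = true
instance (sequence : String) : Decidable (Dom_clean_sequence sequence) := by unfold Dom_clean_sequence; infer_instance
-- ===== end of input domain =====

-- B counts every character of the uppercased string in one frequency table and then prunes the
-- five valid bases from it, instead of accumulating a replaced-only list during the replacement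
-- pass (objective: alternative decomposition, same O(n) cost).

-- ===== PORT A =====
def clean_sequence (sequence : String) : String × (List (String × Int)) :=
  let init : List String × List String := ([], [])
  let st := (PySem.List.enumerate (PySem.Str.upper sequence).toList).foldl
    (fun acc p =>
      let nucleotide := p.2
      if !("ACGTN".toList.contains nucleotide) then
        (acc.1 ++ ["N"], acc.2 ++ [nucleotide.toString])
      else
        (acc.1 ++ [nucleotide.toString], acc.2)) init
  (PySem.Str.join "" st.1, (PySem.Dict.counter st.2).items)

-- ===== PORT B =====
def clean_sequence_alt (sequence : String) : String × (List (String × Int)) :=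
  let upper := PySem.Str.upper sequence
  let counts0 := PySem.Dict.counter (upper.toList.map (fun c => c.toString))
  -- counts.pop(b, None): the popped value is discarded, so each iteration is an erase
  let counts := "ACGTN".toList.foldl (fun d b => d.erase b.toString) counts0
  let cleaned := PySem.Str.join "" (upper.toList.map (fun c =>
      if !("ACGTN".toList.contains c) then "N" else c.toString))
  (cleaned, counts.items)

-- ===== PRECONDITION & SPEC =====
def Spec_clean_sequence (sequence : String) (out : String × (List (String × Int))) : Prop := out = clean_sequence_alt sequence
instance (sequence : String) (out : String × (List (String × Int))) : Decidable (Spec_clean_sequence sequence out) := by unfold Spec_clean_sequence; infer_instance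

-- ===== CLAIM (what is proved, stated in full; the proofs are below) =====
def Claim_equal_clean_sequence : Prop := ∀ (sequence : String), Dom_clean_sequence sequence → Spec_clean_sequence sequence (clean_sequence sequence)

-- ===== LEMMAS AND PROOFS =====

-- folding over enumerate with a function that ignores the index is folding over the list
theorem pv_foldl_enumerate {α σ : Type} (g : σ → α → σ) :
    ∀ (xs : List α) (s : Int) (init : σ),
      (PySem.List.enumerate xs s).foldl (fun a p => g a p.2) init = xs.foldl g init := by
  intro xs
  induction xs with
  | nil => intro s init; rfl
  | cons x t ih => intro s init; simp [PySem.List.enumerate, List.foldl_cons]; exact ih _ _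

-- the accumulator of A's loop, characterised
theorem pv_loopA (u : List Char) : ∀ (a b : List String),
    u.foldl (fun (acc : List String × List String) (c : Char) =>
      if !("ACGTN".toList.contains c) then (acc.1 ++ ["N"], acc.2 ++ [c.toString])
      else (acc.1 ++ [c.toString], acc.2)) (a, b)
    = (a ++ u.map (fun c => if !("ACGTN".toList.contains c) then "N" else c.toString),
       b ++ (u.filter (fun c => !("ACGTN".toList.contains c))).map (fun c => c.toString)) := by
  induction u with
  | nil => intro a b; simp
  | cons c t ih =>
    intro a b
    rw [List.foldl_cons, List.map_cons, List.filter_cons]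
    cases h : "ACGTN".toList.contains c
    · simp only [Bool.not_false, if_true]
      rw [ih]
      simp
    · simp only [Bool.not_true, Bool.false_eq_true, if_false]
      rw [ih]
      simp

-- a test for the old key, conjoined with 'key ≠ k', is just the test for the old key
theorem pv_keyfun {κ ν : Type} [BEq κ] [LawfulBEq κ] (k x : κ) (h : x ≠ k) :
    (fun (p : κ × ν) => (!p.1 == k) && (p.1 == x)) = (fun p => p.1 == x) := by
  funext p
  by_cases hp : p.1 = x
  · simp [hp, h]
  · simp [hp]

-- erasing a key from an insert at that key erases the old entry too
theorem pv_erase_insert_self {κ ν : Type} [BEq κ] [LawfulBEq κ] (d : PySem.Dict κ ν) (k : κ) (v : ν) :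
    (d.insert k v).erase k = d.erase k := by
  apply PySem.Dict.ext
  simp only [PySem.Dict.insert, PySem.Dict.erase]
  split
  · simp only [List.filter_map]
    rw [show ((fun (p : κ × ν) => !p.1 == k) ∘ fun p => if (p.1 == k) = true then (k, v) else p)
          = fun p => !p.1 == k by
        funext p; by_cases hp : (p.1 == k) = true <;> simp [hp]]
    have hid : ∀ p ∈ List.filter (fun (p : κ × ν) => !p.1 == k) d.items,
        (if (p.1 == k) = true then (k, v) else p) = p := by
      intro p hp
      simp only [List.mem_filter] at hp
      have := hp.2
      simp only [Bool.not_eq_eq_eq_not, Bool.not_true] at this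
      simp [this]
    rw [List.map_congr_left hid]
    simp
  · simp

-- erase at k commutes with insert at x ≠ k
theorem pv_erase_insert_of_ne {κ ν : Type} [BEq κ] [LawfulBEq κ] (d : PySem.Dict κ ν) (k x : κ)
    (v : ν) (h : x ≠ k) : (d.insert x v).erase k = (d.erase k).insert x v := by
  have hc : (List.filter (fun (p : κ × ν) => !p.1 == k) d.items).any (fun p => p.1 == x)
      = d.items.any (fun p => p.1 == x) := by
    rw [List.any_filter, show (fun (p : κ × ν) => (!p.1 == k) && (p.1 == x)) = (fun p => p.1 == x)
      from pv_keyfun k x h]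
  apply PySem.Dict.ext
  simp only [PySem.Dict.insert, PySem.Dict.erase, PySem.Dict.contains, hc]
  split
  · rw [List.filter_map]
    have : ((fun (p : κ × ν) => !p.1 == k) ∘ fun p => if (p.1 == x) = true then (x, v) else p)
        = fun p => !p.1 == k := by
      funext p
      by_cases hp : (p.1 == x) = true
      · have hpx : p.1 = x := by simpa using hp
        simp [hpx]
      · simp [hp]
    rw [this]
  · simp [h]

-- lookups away from the erased key are unchanged
theorem pv_getD_erase_of_ne {κ ν : Type} [BEq κ] [LawfulBEq κ] (d : PySem.Dict κ ν) (k x : κ)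
    (dflt : ν) (h : x ≠ k) : (d.erase k).getD x dflt = d.getD x dflt := by
  simp only [PySem.Dict.getD, PySem.Dict.get?, PySem.Dict.erase, List.find?_filter]
  have : (fun (p : κ × ν) => decide ((!p.1 == k) = true ∧ (p.1 == x) = true)) = fun p => p.1 == x := by
    funext p
    by_cases hp : p.1 = x
    · simp [hp, h]
    · simp [hp]
  rw [this]

-- pruning one key from a frequency table = counting with that key filtered out
theorem pv_erase_counter {κ : Type} [BEq κ] [LawfulBEq κ] (k : κ) (xs : List κ) :
    (PySem.Dict.counter xs).erase k = PySem.Dict.counter (xs.filter (fun x => !(x == k))) := by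
  induction xs using List.reverseRecOn with
  | nil => rfl
  | append_singleton xs x ih =>
    rw [PySem.Dict.counter_append_singleton, List.filter_append]
    by_cases hx : x = k
    · subst hx
      simp only [PySem.Dict.modify]
      rw [pv_erase_insert_self, ih]
      simp
    · simp only [PySem.Dict.modify]
      rw [pv_erase_insert_of_ne _ _ _ _ hx, ← pv_getD_erase_of_ne _ k x _ hx, ih]
      simp [hx, PySem.Dict.counter_append_singleton, PySem.Dict.modify]

-- single-char strings compare like their characters
theorem pv_singleton_eq_iff (c x : Char) : String.singleton c = String.singleton x ↔ c = x := by
  constructor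
  · intro h
    have := congrArg String.toList h
    simpa using this
  · intro h
    rw [h]

theorem pv_beq_toString' (c : Char) : ∀ (x : Char), (c.toString == x.toString) = (c == x) := by
  intro x
  rw [Bool.eq_iff_iff]
  simp [pv_singleton_eq_iff]

-- main lemma: the pruned full counter equals A's counter of the replaced characters
theorem pv_counts_eq (u : List Char) :
    ("ACGTN".toList.foldl (fun d b => d.erase b.toString)
        (PySem.Dict.counter (u.map (fun c => c.toString))))
      = PySem.Dict.counter
          ((u.filter (fun c => !("ACGTN".toList.contains c))).map (fun c => c.toString)) := by
  have hl : "ACGTN".toList = ['A', 'C', 'G', 'T', 'N'] := rfl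
  rw [hl]
  simp only [List.foldl_cons, List.foldl_nil]
  rw [pv_erase_counter, pv_erase_counter, pv_erase_counter, pv_erase_counter, pv_erase_counter]
  rw [List.filter_filter, List.filter_filter, List.filter_filter, List.filter_filter]
  rw [List.filter_map]
  congr 1
  congr 1
  apply List.filter_congr
  intro c _
  simp only [Function.comp_apply]
  simp only [pv_beq_toString' c]
  by_cases hA : c = 'A'
  · simp [hA]
  by_cases hC : c = 'C'
  · simp [hC]
  by_cases hG : c = 'G'
  · simp [hG]
  by_cases hT : c = 'T'
  · simp [hT]
  by_cases hN : c = 'N'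
  · simp [hN]
  simp [hA, hC, hG, hT, hN]

-- ===== VERDICT (by name: the statement is the Claim_ definition above) =====
theorem clean_sequence_spec : Claim_equal_clean_sequence := by
  intro seq _
  unfold Spec_clean_sequence clean_sequence clean_sequence_alt
  dsimp only
  rw [pv_foldl_enumerate
    (fun (acc : List String × List String) (c : Char) =>
      if !("ACGTN".toList.contains c) then (acc.1 ++ ["N"], acc.2 ++ [c.toString])
      else (acc.1 ++ [c.toString], acc.2))]
  rw [pv_loopA]
  rw [pv_counts_eq]
  simp
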